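-- pv_equiv track=rewrite | github.com/mcoski8/tw | analysis/scripts/strategy_v11_high_only_omaha_first.py | _omaha_bot_score
-- ===== SOURCE A (Python) =====
-- def _omaha_bot_score(bot_ranks: list[int], bot_suits: list[int]) -> int:
--     """Python port of `engine/src/opp_models.rs::omaha_bot_score`."""
--     score = 0
--     # High-card value: each rank > 8 adds (rank - 8) × 2.
--     for r in bot_ranks:
--         if r > 8:
--             score += (r - 8) * 2
--     # Pair/trip bonuses.
--     rank_counts = [0] * 15
--     for r in bot_ranks:
--         rank_counts[r] += 1
--     for r in range(2, 15):
--         c = rank_counts[r]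
--         if c == 2:
--             score += 15 + r
--         elif c == 3:
--             score += 30 + r * 2
--         elif c == 4:
--             score += 60 + r * 3
--     # Connectivity: longest run of consecutive distinct ranks.
--     distinct = sorted(set(bot_ranks))
--     longest = 1
--     cur = 1
--     for i in range(1, len(distinct)):
--         if distinct[i] == distinct[i - 1] + 1:
--             cur += 1
--             longest = max(longest, cur)
--         else:
--             cur = 1
--     score += longest * 8
--     # Wheel draws.
--     wheel_count = sum(1 for r in bot_ranks if r == 14 or 2 <= r <= 5)
--     if wheel_count >= 3:
--         score += 6
--     elif wheel_count >= 2: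
--         score += 3
--     # Suit pattern.
--     sc = [0, 0, 0, 0]
--     for s in bot_suits:
--         sc[s] += 1
--     sorted_sc = sorted(sc, reverse=True)
--     if sorted_sc[0] == 2 and sorted_sc[1] == 2:
--         score += 14
--     elif sorted_sc[0] == 2 and sorted_sc[1] == 1:
--         score += 7
--     elif sorted_sc[0] == 1 and sorted_sc[1] == 1:
--         score += 0
--     elif sorted_sc[0] == 3 and sorted_sc[1] == 1:
--         score -= 4
--     elif sorted_sc[0] == 4:
--         score -= 8
--     return score
-- ===== SOURCE B (Python) =====
-- def _omaha_bot_score(bot_ranks: list[int], bot_suits: list[int]) -> int: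
--     """Single bucket scan over ranks 0..14 accumulating high-card, pair/trip/quad,
--     connectivity-run and wheel contributions in one pass."""
--     counts = [0] * 15
--     for r in bot_ranks:
--         counts[r] += 1
--     score = 0
--     longest = 1
--     run = 0
--     wheel = 0
--     for r in range(15):
--         c = counts[r]
--         if c > 0:
--             run += 1
--             if run > longest:
--                 longest = run
--         else:
--             run = 0
--         if r > 8:
--             score += c * (r - 8) * 2
--         if r >= 2:
--             if c == 2:
--                 score += 15 + r
--             elif c == 3:
--                 score += 30 + r * 2
--             elif c == 4:
--                 score += 60 + r * 3
--         if r == 14 or 2 <= r <= 5: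
--             wheel += c
--     score += longest * 8
--     if wheel >= 3:
--         score += 6
--     elif wheel >= 2:
--         score += 3
--     sc = [0, 0, 0, 0]
--     for s in bot_suits:
--         sc[s] += 1
--     sorted_sc = sorted(sc, reverse=True)
--     if sorted_sc[0] == 2 and sorted_sc[1] == 2:
--         score += 14
--     elif sorted_sc[0] == 2 and sorted_sc[1] == 1:
--         score += 7
--     elif sorted_sc[0] == 1 and sorted_sc[1] == 1:
--         score += 0
--     elif sorted_sc[0] == 3 and sorted_sc[1] == 1:
--         score -= 4
--     elif sorted_sc[0] == 4:
--         score -= 8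
--     return score
-- ===== Notes on version B (the rewrite author's own statement) =====
-- stated objective: alternative
-- what changed: A's four separate rank passes (high-card loop over the hand, bonus loop over ranks 2..14, sorted(set(...)) consecutive-run scan, wheel generator sum) are replaced by a single forward scan over the 15-bucket count array that accumulates high-card value, pair/trip/quad bonuses, the longest run of occupied buckets and the wheel count at once; the suit pass is kept.
-- outside the precondition, e.g. on _omaha_bot_score([-1], [0]): A returns 8, B returns 20
import Mathlib
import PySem

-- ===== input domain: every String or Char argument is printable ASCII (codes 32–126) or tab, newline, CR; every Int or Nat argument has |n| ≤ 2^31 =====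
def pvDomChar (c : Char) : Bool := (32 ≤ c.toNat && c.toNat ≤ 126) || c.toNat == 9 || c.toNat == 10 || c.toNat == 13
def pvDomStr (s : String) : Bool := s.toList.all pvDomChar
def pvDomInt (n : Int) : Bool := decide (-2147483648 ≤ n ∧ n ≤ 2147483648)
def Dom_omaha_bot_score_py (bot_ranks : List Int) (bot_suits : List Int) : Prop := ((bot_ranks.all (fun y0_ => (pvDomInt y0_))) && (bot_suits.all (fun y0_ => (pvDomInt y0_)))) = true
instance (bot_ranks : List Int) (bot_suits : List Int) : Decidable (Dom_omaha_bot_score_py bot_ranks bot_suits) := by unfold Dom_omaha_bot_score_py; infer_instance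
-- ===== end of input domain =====

-- B replaces A's four separate rank passes by one forward scan over the 15-bucket
-- count array (objective: alternative; the suit pass is unchanged).

-- ===== PORT A =====
-- shared helper: `buckets[i] += 1` (Python list index semantics)
def pvBump (cs : List Int) (i : Int) : List Int :=
  PySem.List.pySetD cs i (PySem.List.pyGetD cs i 0 + 1)

-- suit-pattern tail, identical lines in A and in B
def pvSuitTail (score : Int) (bot_suits : List Int) : Int :=
  let sc : List Int := bot_suits.foldl (fun cs s => pvBump cs s) [0, 0, 0, 0]
  let ss : List Int := PySem.List.sorted sc (fun x => x) true
  let d0 := PySem.List.pyGetD ss 0 0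
  let d1 := PySem.List.pyGetD ss 1 0
  if d0 = 2 ∧ d1 = 2 then score + 14
  else if d0 = 2 ∧ d1 = 1 then score + 7
  else if d0 = 1 ∧ d1 = 1 then score + 0
  else if d0 = 3 ∧ d1 = 1 then score - 4
  else if d0 = 4 then score - 8
  else score

-- A's connectivity loop: for i in range(1, len(distinct)): ...
def pvLongest (distinct : List Int) : Int :=
  ((PySem.List.pyRange 1 (distinct.length : Int) 1).foldl (fun (lc : Int × Int) i =>
    if PySem.List.pyGetD distinct i 0 = PySem.List.pyGetD distinct (i - 1) 0 + 1 then
      (max lc.1 (lc.2 + 1), lc.2 + 1)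
    else (lc.1, 1)) (1, 1)).1

def omaha_bot_score_py (bot_ranks : List Int) (bot_suits : List Int) : Int :=
  let score : Int := bot_ranks.foldl (fun score r => if 8 < r then score + (r - 8) * 2 else score) 0
  let rank_counts : List Int := bot_ranks.foldl (fun cs r => pvBump cs r) (List.replicate 15 (0 : Int))
  let score : Int := (PySem.List.pyRange 2 15 1).foldl (fun score r =>
      let c := PySem.List.pyGetD rank_counts r 0
      if c = 2 then score + (15 + r)
      else if c = 3 then score + (30 + r * 2)
      else if c = 4 then score + (60 + r * 3)
      else score) score
  let distinct := PySem.List.sorted (PySem.Set.ofList bot_ranks) (fun x => x) false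
  let score := score + pvLongest distinct * 8
  let wheel_count : Int := bot_ranks.foldl (fun w r => if r = 14 ∨ (2 ≤ r ∧ r ≤ 5) then w + 1 else w) 0
  let score := if 3 ≤ wheel_count then score + 6 else if 2 ≤ wheel_count then score + 3 else score
  pvSuitTail score bot_suits

-- ===== PORT B =====
-- body of B's single bucket-scan loop
def pvAltStep (counts : List Int) (st : Int × (Int × Int) × Int) (r : Int) : Int × (Int × Int) × Int :=
  let c := PySem.List.pyGetD counts r 0
  let lr : Int × Int :=
    if 0 < c then
      (if st.2.1.1 < st.2.1.2 + 1 then st.2.1.2 + 1 else st.2.1.1, st.2.1.2 + 1)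
    else (st.2.1.1, 0)
  let score := if 8 < r then st.1 + c * (r - 8) * 2 else st.1
  let score := if 2 ≤ r then
      (if c = 2 then score + (15 + r)
       else if c = 3 then score + (30 + r * 2)
       else if c = 4 then score + (60 + r * 3)
       else score)
    else score
  let wheel := if r = 14 ∨ (2 ≤ r ∧ r ≤ 5) then st.2.2 + c else st.2.2
  (score, lr, wheel)

def omaha_bot_score_py_alt (bot_ranks : List Int) (bot_suits : List Int) : Int :=
  let counts : List Int := bot_ranks.foldl (fun cs r => pvBump cs r) (List.replicate 15 (0 : Int))
  let st := (PySem.List.pyRange 0 15 1).foldl (pvAltStep counts) (0, (1, 0), 0)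
  let score := st.1 + st.2.1.1 * 8
  let score := if 3 ≤ st.2.2 then score + 6 else if 2 ≤ st.2.2 then score + 3 else score
  pvSuitTail score bot_suits

-- ===== PRECONDITION & SPEC =====
-- Pre_ keeps ranks in the natural card-rank bucket range 0..14 and suits in the index
-- range Python accepts for the 4 suit buckets; outside it A raises IndexError except for
-- negative ranks, which only return via Python's negative-index wraparound into the wrong
-- rank bucket (outside the natural domain of card ranks, so excluded).
def Pre_omaha_bot_score_py (bot_ranks : List Int) (bot_suits : List Int) : Prop :=
  (∀ r ∈ bot_ranks, 0 ≤ r ∧ r ≤ 14) ∧ (∀ s ∈ bot_suits, -4 ≤ s ∧ s ≤ 3)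
instance (bot_ranks : List Int) (bot_suits : List Int) : Decidable (Pre_omaha_bot_score_py bot_ranks bot_suits) := by
  unfold Pre_omaha_bot_score_py; infer_instance

def pvWitness_omaha_bot_score_py : List Int × List Int := ([14, 13, 2, 2], [0, 1, 2, 3])

def Spec_omaha_bot_score_py (bot_ranks : List Int) (bot_suits : List Int) (out : Int) : Prop := out = omaha_bot_score_py_alt bot_ranks bot_suits
instance (bot_ranks : List Int) (bot_suits : List Int) (out : Int) : Decidable (Spec_omaha_bot_score_py bot_ranks bot_suits out) := by unfold Spec_omaha_bot_score_py; infer_instance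

-- ===== CLAIM (what is proved, stated in full; the proofs are below) =====
def Claim_equal_omaha_bot_score_py : Prop := ∀ (bot_ranks : List Int) (bot_suits : List Int), Dom_omaha_bot_score_py bot_ranks bot_suits → Pre_omaha_bot_score_py bot_ranks bot_suits → Spec_omaha_bot_score_py bot_ranks bot_suits (omaha_bot_score_py bot_ranks bot_suits)


-- ===== LEMMAS AND PROOFS =====

-- pointwise pieces of B's fused loop body
def pvHc (c r : Int) : Int := if 8 < r then c * (r - 8) * 2 else 0
def pvBonus (c r : Int) : Int :=
  if c = 2 then 15 + r else if c = 3 then 30 + r * 2 else if c = 4 then 60 + r * 3 else 0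
def pvBonusG (c r : Int) : Int := if 2 ≤ r then pvBonus c r else 0
def pvWheelT (c r : Int) : Int := if r = 14 ∨ (2 ≤ r ∧ r ≤ 5) then c else 0
def pvRunStepB (b : Bool) (p : Int × Int) : Int × Int :=
  if b then (max p.1 (p.2 + 1), p.2 + 1) else (p.1, 0)

-- structural form of A's connectivity scan
def pvGoA : Int × Int → Int → List Int → Int × Int
  | st, _, [] => st
  | (l, c), prev, x :: xs =>
      if x = prev + 1 then pvGoA (max l (c + 1), c + 1) x xs else pvGoA (l, 1) x xs

def pvStartA (l : Int) : List Int → Int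
  | [] => l
  | d :: ds => (pvGoA (l, 1) d ds).1

-- values selected by a bool mask starting at rank v
def pvSelM : List Bool → Int → List Int
  | [], _ => []
  | b :: bs, v => (if b then [v] else []) ++ pvSelM bs (v + 1)

lemma pvSelM_ge : ∀ (bs : List Bool) (v x : Int), x ∈ pvSelM bs v → v ≤ x := by
  intro bs
  induction bs with
  | nil => intro v x hx; simp [pvSelM] at hx
  | cons b bs ih =>
    intro v x hx
    simp only [pvSelM, List.mem_append] at hx
    rcases hx with hx | hx
    · rcases b with _ | _ <;> simp_all
    · have := ih (v + 1) x hx; omega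

-- B's run scan equals A's structural scan on the selected values
lemma pv_run_eq_goA : ∀ (bs : List Bool) (v l run : Int), 1 ≤ l → 0 ≤ run →
    (bs.foldl (fun p b => pvRunStepB b p) (l, run)).1 =
    (if 0 < run then (pvGoA (l, run) (v - 1) (pvSelM bs v)).1 else pvStartA l (pvSelM bs v)) := by
  intro bs
  induction bs with
  | nil =>
    intro v l run hl hrun
    simp only [List.foldl_nil, pvSelM]
    split_ifs <;> simp [pvGoA, pvStartA]
  | cons b bs ih =>
    intro v l run hl hrun
    rw [List.foldl_cons]
    cases b with
    | true =>
      have hstep : pvRunStepB true (l, run) = (max l (run + 1), run + 1) := rfl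
      rw [hstep, ih (v + 1) (max l (run + 1)) (run + 1) (le_max_of_le_left hl) (by omega)]
      rw [if_pos (by omega : (0 : Int) < run + 1)]
      have hsel : pvSelM (true :: bs) v = v :: pvSelM bs (v + 1) := by simp [pvSelM]
      rw [hsel]
      by_cases hrun0 : (0 : Int) < run
      · rw [if_pos hrun0]
        have : pvGoA (l, run) (v - 1) (v :: pvSelM bs (v + 1)) =
            pvGoA (max l (run + 1), run + 1) v (pvSelM bs (v + 1)) := by
          simp only [pvGoA]
          rw [if_pos (by omega : v = v - 1 + 1)]
        rw [this, show v + 1 - 1 = v from by omega]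
      · rw [if_neg hrun0]
        have hrz : run = 0 := by omega
        subst hrz
        have hml : max l (0 + 1) = l := max_eq_left (by omega)
        simp only [pvStartA, hml]
        norm_num
    | false =>
      have hstep : pvRunStepB false (l, run) = (l, 0) := rfl
      rw [hstep, ih (v + 1) l 0 hl (le_refl 0)]
      rw [if_neg (by omega : ¬ (0 : Int) < 0)]
      have hsel : pvSelM (false :: bs) v = pvSelM bs (v + 1) := by simp [pvSelM]
      rw [hsel]
      by_cases hrun0 : (0 : Int) < run
      · rw [if_pos hrun0]
        cases hsel2 : pvSelM bs (v + 1) with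
        | nil => simp [pvStartA, pvGoA]
        | cons d ds =>
          have hd : v + 1 ≤ d := pvSelM_ge bs (v + 1) d (by rw [hsel2]; simp)
          have hne : ¬ d = (v - 1) + 1 := by omega
          simp only [pvStartA, pvGoA]
          rw [if_neg hne]
      · rw [if_neg hrun0]

-- filter of a range = mask selection
lemma pv_filter_eq_selM : ∀ (n : Nat) (a : Int) (p : Int → Bool),
    (PySem.List.pyRange a (a + n) 1).filter p = pvSelM ((PySem.List.pyRange a (a + n) 1).map p) a := by
  intro n
  induction n with
  | zero =>
    intro a p
    rw [PySem.List.pyRange_one_eq_nil (by omega : a + ((0 : Nat) : Int) ≤ a)]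
    rfl
  | succ m ih =>
    intro a p
    have hcons := PySem.List.pyRange_one_cons (by push_cast; omega : a < a + ((m + 1 : Nat) : Int))
    rw [hcons]
    have harg : a + 1 + (m : Int) = a + ((m + 1 : Nat) : Int) := by push_cast; omega
    have ihm := ih (a + 1) p
    rw [harg] at ihm
    rw [List.filter_cons, List.map_cons]
    push_cast at ihm
    cases hp : p a <;> simp [pvSelM, hp] <;> exact ihm

-- A's index-driven scan = structural scan
lemma pv_idx_goA : ∀ (tail pre : List Int) (hpre : pre ≠ []) (st : Int × Int),
    ((PySem.List.pyRange (pre.length : Int) ((pre.length : Int) + tail.length) 1).foldl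
      (fun (lc : Int × Int) i =>
        if PySem.List.pyGetD (pre ++ tail) i 0 = PySem.List.pyGetD (pre ++ tail) (i - 1) 0 + 1 then
          (max lc.1 (lc.2 + 1), lc.2 + 1)
        else (lc.1, 1)) st) = pvGoA st (pre.getLast hpre) tail := by
  intro tail
  induction tail with
  | nil =>
    intro pre hpre st
    rw [PySem.List.pyRange_one_eq_nil (by simp : ((pre.length : Int)) + (([] : List Int).length : Int) ≤ (pre.length : Int))]
    rfl
  | cons x xs ih =>
    intro pre hpre st
    have hlen : (0 : Int) < (pre.length : Int) := by
      have : pre.length ≠ 0 := fun hh => hpre (List.length_eq_zero_iff.mp hh)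
      omega
    rw [PySem.List.pyRange_one_cons (by simp only [List.length_cons]; omega :
      (pre.length : Int) < (pre.length : Int) + ((x :: xs).length : Int))]
    rw [List.foldl_cons]
    -- the two reads of this step
    have hread1 : PySem.List.pyGetD (pre ++ x :: xs) ((pre.length : Int)) 0 = x := by
      rw [PySem.List.pyGetD_natCast]
      rw [List.getD_eq_getElem?_getD, List.getElem?_append_right (le_refl _)]
      simp
    have hread0 : PySem.List.pyGetD (pre ++ x :: xs) ((pre.length : Int) - 1) 0 =
        pre.getLast hpre := by
      have h1 : ((pre.length : Int) - 1) = ((pre.length - 1 : Nat) : Int) := by omega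
      rw [h1, PySem.List.pyGetD_natCast]
      rw [List.getD_eq_getElem?_getD,
        List.getElem?_append_left (by omega : pre.length - 1 < pre.length)]
      rw [List.getElem?_eq_getElem (by omega : pre.length - 1 < pre.length)]
      simp [List.getLast_eq_getElem]
    rw [hread1, hread0]
    -- recurse with pre' = pre ++ [x]
    have hpre' : pre ++ [x] ≠ [] := by simp
    have ihx := ih (pre ++ [x]) hpre' (if x = pre.getLast hpre + 1
      then (max st.1 (st.2 + 1), st.2 + 1) else (st.1, 1))
    have hL : ((pre ++ [x]).length : Int) = (pre.length : Int) + 1 := by simp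
    have hA : (pre ++ [x]) ++ xs = pre ++ x :: xs := by simp
    have hB : ((pre ++ [x]).length : Int) + (xs.length : Int) =
        (pre.length : Int) + ((x :: xs).length : Int) := by simp; omega
    have hGL : (pre ++ [x]).getLast hpre' = x := by simp
    rw [hA, hB, hGL] at ihx
    rw [hL] at ihx
    rw [ihx]
    by_cases hx : x = pre.getLast hpre + 1 <;> simp [pvGoA, hx]

lemma pv_longest_eq_startA : ∀ (ds : List Int), pvLongest ds = pvStartA 1 ds := by
  intro ds
  cases ds with
  | nil => rfl
  | cons d ds =>
    unfold pvLongest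
    have hidx := pv_idx_goA ds [d] (by simp) ((1 : Int), (1 : Int))
    have hl : (([d] : List Int).length : Int) = 1 := by simp
    rw [hl] at hidx
    have hb : ((d :: ds).length : Int) = 1 + (ds.length : Int) := by simp; omega
    rw [hb, show (d :: ds : List Int) = [d] ++ ds from rfl, hidx]
    rfl

-- sorted(set(xs)) is the filtered range
lemma pv_distinct_eq (xs : List Int) (h : ∀ r ∈ xs, 0 ≤ r ∧ r ≤ 14) :
    PySem.List.sorted (PySem.Set.ofList xs) (fun x => x) false =
    (PySem.List.pyRange 0 15 1).filter (fun v => decide (v ∈ xs)) := by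
  apply PySem.List.sorted_eq_of_perm_of_pairwise_lt
  · apply (List.perm_ext_iff_of_nodup
      ((PySem.List.nodup_pyRange_one 0 15).filter _) (PySem.Set.nodup_ofList xs)).mpr
    intro v
    rw [List.mem_filter, PySem.Set.mem_ofList, PySem.List.mem_pyRange_one]
    constructor
    · rintro ⟨_, hv⟩; simpa using hv
    · intro hv
      have := h v hv
      exact ⟨by omega, by simpa using hv⟩
  · exact (PySem.List.pairwise_lt_pyRange_one 0 15).filter _

-- the bucket list is the per-rank count vector
lemma pv_cnt_go : ∀ (xs : List Int) (acc : List Int), acc.length = 15 → (∀ r ∈ xs, 0 ≤ r ∧ r ≤ 14) →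
    List.foldl (fun cs r => pvBump cs r) acc xs =
    (PySem.List.pyRange 0 15 1).map (fun v => PySem.List.pyGetD acc v 0 + (xs.count v : Int)) := by
  intro xs
  induction xs with
  | nil =>
    intro acc hlen _
    have : (PySem.List.pyRange 0 15 1).map (fun v => PySem.List.pyGetD acc v 0 + ((0 : Nat) : Int)) =
        (PySem.List.pyRange 0 ((acc.length : Int)) 1).map (fun v => PySem.List.pyGetD acc v 0) := by
      rw [hlen]; simp
    simpa using (this.trans (PySem.List.map_pyGetD_pyRange_zero' acc 0)).symm
  | cons x xs ih =>
    intro acc hlen h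
    have hx := h x (by simp)
    have hxs : ∀ r ∈ xs, 0 ≤ r ∧ r ≤ 14 := fun r hr => h r (by simp [hr])
    have hlen' : (pvBump acc x).length = 15 := by
      simpa [pvBump, PySem.List.length_pySetD] using hlen
    rw [List.foldl_cons, ih (pvBump acc x) hlen' hxs]
    apply List.map_congr_left
    intro v hv
    have hv' := PySem.List.mem_pyRange_one.mp hv
    -- rewrite both indices as Nat casts
    have hxn : x = ((x.toNat : Nat) : Int) := by omega
    have hvn : v = ((v.toNat : Nat) : Int) := by omega
    have hxl : x.toNat < acc.length := by omega
    have hget : PySem.List.pyGetD (pvBump acc x) v 0 =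
        if v.toNat = x.toNat then PySem.List.pyGetD acc x 0 + 1 else PySem.List.pyGetD acc v 0 := by
      rw [pvBump, hxn, hvn, PySem.List.pyGetD_pySetD_natCast acc x.toNat v.toNat _ 0 hxl]
      rw [← hxn, ← hvn]
    rw [hget]
    by_cases hvx : v = x
    · have : v.toNat = x.toNat := by omega
      simp only [hvx, if_true, List.count_cons_self]
      push_cast
      ring
    · have hne : ¬ v.toNat = x.toNat := by omega
      have hxv : ¬ x = v := fun hh => hvx hh.symm
      simp [hne, List.count_cons, hvx]
      exact hxv

lemma pv_cnt_eq (xs : List Int) (h : ∀ r ∈ xs, 0 ≤ r ∧ r ≤ 14) :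
    List.foldl (fun cs r => pvBump cs r) (List.replicate 15 (0 : Int)) xs =
    (PySem.List.pyRange 0 15 1).map (fun v => (xs.count v : Int)) := by
  rw [pv_cnt_go xs (List.replicate 15 (0 : Int)) (by simp) h]
  apply List.map_congr_left
  intro v hv
  have hv' := PySem.List.mem_pyRange_one.mp hv
  have hvn : v = ((v.toNat : Nat) : Int) := by omega
  rw [hvn, PySem.List.pyGetD_natCast]
  have : v.toNat < 15 := by omega
  have hlt : v.toNat < (List.replicate 15 (0 : Int)).length := by simpa using this
  rw [List.getD_eq_getElem?_getD, List.getElem?_eq_getElem hlt, List.getElem_replicate]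
  simp

lemma pv_ind_sum (g : Int → Int) (x : Int) (h0 : 0 ≤ x) (h14 : x ≤ 14) :
    ((PySem.List.pyRange 0 15 1).map (fun v => (if v = x then (1 : Int) else 0) * g v)).sum = g x := by
  have hr : PySem.List.pyRange 0 15 1 = [0, 1, 2, 3, 4, 5, 6, 7, 8, 9, 10, 11, 12, 13, 14] := by
    decide
  rw [hr]
  interval_cases x <;> norm_num

lemma pv_fold_sum (g : Int → Int) : ∀ (xs : List Int) (a : Int), (∀ r ∈ xs, 0 ≤ r ∧ r ≤ 14) →
    xs.foldl (fun s r => s + g r) a =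
    a + ((PySem.List.pyRange 0 15 1).map (fun v => (xs.count v : Int) * g v)).sum := by
  intro xs
  induction xs with
  | nil => intro a h; simp
  | cons x xs ih =>
    intro a h
    have hx := h x (by simp)
    have hxs : ∀ r ∈ xs, 0 ≤ r ∧ r ≤ 14 := fun r hr => h r (by simp [hr])
    rw [List.foldl_cons, ih (a + g x) hxs]
    have hsplit : ((PySem.List.pyRange 0 15 1).map (fun v => (((x :: xs).count v : Int)) * g v)).sum =
        ((PySem.List.pyRange 0 15 1).map (fun v => ((xs.count v : Int)) * g v)).sum +
        ((PySem.List.pyRange 0 15 1).map (fun v => (if v = x then (1 : Int) else 0) * g v)).sum := by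
      rw [← PySem.List.sum_map_add_int]
      apply congrArg
      apply List.map_congr_left
      intro v _
      have : ((x :: xs).count v : Int) = (xs.count v : Int) + (if v = x then (1 : Int) else 0) := by
        by_cases hvx : v = x
        · simp [hvx]
        · have hxv : ¬ x = v := fun hh => hvx hh.symm
          simp [List.count_cons, hvx, hxv]
      rw [this]; ring
    rw [hsplit, pv_ind_sum g x hx.1 hx.2]
    ring

-- decomposition of B's loop body
lemma pv_altStep_eq (C : List Int) (st : Int × (Int × Int) × Int) (r : Int) :
    pvAltStep C st r =
    (st.1 + (pvHc (PySem.List.pyGetD C r 0) r + pvBonusG (PySem.List.pyGetD C r 0) r),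
     pvRunStepB (decide (0 < PySem.List.pyGetD C r 0)) st.2.1,
     st.2.2 + pvWheelT (PySem.List.pyGetD C r 0) r) := by
  simp only [pvAltStep, pvHc, pvBonus, pvBonusG, pvWheelT, pvRunStepB, decide_eq_true_eq,
    max_def_lt]
  split_ifs <;> simp_all <;> try ring

lemma pv_foldl_triple {a b c i : Type} (f : a → i → a) (g : b → i → b) (h : c → i → c) :
    ∀ (xs : List i) (x : a) (y : b) (z : c),
      xs.foldl (fun st r => (f st.1 r, g st.2.1 r, h st.2.2 r)) (x, y, z) =
      (xs.foldl f x, xs.foldl g y, xs.foldl h z) := by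
  intro xs
  induction xs with
  | nil => intro x y z; rfl
  | cons r xs ih => intro x y z; simpa [List.foldl_cons] using ih (f x r) (g y r) (h z r)

-- ===== VERDICT (by name: the statement is the Claim_ definition above) =====
theorem omaha_bot_score_py_spec : Claim_equal_omaha_bot_score_py := by
  intro bot_ranks bot_suits hdom hpre
  obtain ⟨hR, hS⟩ := hpre
  unfold Spec_omaha_bot_score_py
  simp only [omaha_bot_score_py, omaha_bot_score_py_alt]
  -- the common bucket vector
  set C : List Int := List.foldl (fun cs r => pvBump cs r) (List.replicate 15 (0 : Int)) bot_ranks with hC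
  have hCK : C = (PySem.List.pyRange 0 15 1).map (fun v => (bot_ranks.count v : Int)) :=
    pv_cnt_eq bot_ranks hR
  have hread : ∀ v ∈ PySem.List.pyRange 0 15 1,
      PySem.List.pyGetD C v 0 = (bot_ranks.count v : Int) := by
    intro v hv
    have hv' := PySem.List.mem_pyRange_one.mp hv
    rw [hCK, PySem.List.pyGetD_map_pyRange_of_nonneg _ _ _ _ hv'.1 hv'.2]
  -- ==== B structure ====
  have hB : (PySem.List.pyRange 0 15 1).foldl (pvAltStep C) (0, (1, 0), 0) =
      ((PySem.List.pyRange 0 15 1).foldl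
        (fun s r => s + (pvHc (PySem.List.pyGetD C r 0) r + pvBonusG (PySem.List.pyGetD C r 0) r)) 0,
       (PySem.List.pyRange 0 15 1).foldl
        (fun p r => pvRunStepB (decide (0 < PySem.List.pyGetD C r 0)) p) (1, 0),
       (PySem.List.pyRange 0 15 1).foldl
        (fun w r => w + pvWheelT (PySem.List.pyGetD C r 0) r) 0) := by
    rw [show pvAltStep C = (fun (st : Int × (Int × Int) × Int) r =>
        ((fun (s : Int) r => s + (pvHc (PySem.List.pyGetD C r 0) r + pvBonusG (PySem.List.pyGetD C r 0) r)) st.1 r,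
         (fun (p : Int × Int) r => pvRunStepB (decide (0 < PySem.List.pyGetD C r 0)) p) st.2.1 r,
         (fun (w : Int) r => w + pvWheelT (PySem.List.pyGetD C r 0) r) st.2.2 r)) from
      funext fun st => funext fun r => pv_altStep_eq C st r]
    exact pv_foldl_triple
      (fun (s : Int) r => s + (pvHc (PySem.List.pyGetD C r 0) r + pvBonusG (PySem.List.pyGetD C r 0) r))
      (fun (p : Int × Int) r => pvRunStepB (decide (0 < PySem.List.pyGetD C r 0)) p)
      (fun (w : Int) r => w + pvWheelT (PySem.List.pyGetD C r 0) r)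
      (PySem.List.pyRange 0 15 1) 0 (1, 0) 0
  rw [hB]
  -- B score component as a sum
  rw [PySem.List.foldl_add (PySem.List.pyRange 0 15 1)
    (fun r => pvHc (PySem.List.pyGetD C r 0) r + pvBonusG (PySem.List.pyGetD C r 0) r) 0]
  -- B wheel component as a sum
  rw [PySem.List.foldl_add (PySem.List.pyRange 0 15 1)
    (fun r => pvWheelT (PySem.List.pyGetD C r 0) r) 0]
  -- ==== A high-card fold ====
  have hA1 : bot_ranks.foldl (fun score r => if 8 < r then score + (r - 8) * 2 else score) 0 =
      0 + ((PySem.List.pyRange 0 15 1).map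
        (fun v => (bot_ranks.count v : Int) * (if 8 < v then (v - 8) * 2 else 0))).sum := by
    rw [show (fun (score : Int) (r : Int) => if 8 < r then score + (r - 8) * 2 else score) =
        (fun s r => s + (if 8 < r then (r - 8) * 2 else 0)) from
      funext fun s => funext fun r => by split_ifs <;> ring]
    exact pv_fold_sum _ bot_ranks 0 hR
  rw [hA1]
  -- ==== A bonus fold ====
  rw [show (fun (score : Int) (r : Int) =>
      if PySem.List.pyGetD C r 0 = 2 then score + (15 + r)
      else if PySem.List.pyGetD C r 0 = 3 then score + (30 + r * 2)
      else if PySem.List.pyGetD C r 0 = 4 then score + (60 + r * 3)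
      else score) = (fun s r => s + pvBonus (PySem.List.pyGetD C r 0) r) from
    funext fun s => funext fun r => by unfold pvBonus; split_ifs <;> ring]
  rw [PySem.List.foldl_add (PySem.List.pyRange 2 15 1)
    (fun r => pvBonus (PySem.List.pyGetD C r 0) r)]
  -- ==== A wheel fold ====
  have hA3 : bot_ranks.foldl (fun w r => if r = 14 ∨ (2 ≤ r ∧ r ≤ 5) then w + 1 else w) 0 =
      0 + ((PySem.List.pyRange 0 15 1).map
        (fun v => (bot_ranks.count v : Int) * (if v = 14 ∨ (2 ≤ v ∧ v ≤ 5) then 1 else 0))).sum := by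
    rw [show (fun (w : Int) (r : Int) => if r = 14 ∨ (2 ≤ r ∧ r ≤ 5) then w + 1 else w) =
        (fun s r => s + (if r = 14 ∨ (2 ≤ r ∧ r ≤ 5) then 1 else 0)) from
      funext fun s => funext fun r => by split_ifs <;> ring]
    exact pv_fold_sum _ bot_ranks 0 hR
  rw [hA3]
  -- ==== connectivity ====
  have hconn : pvLongest (PySem.List.sorted (PySem.Set.ofList bot_ranks) (fun x => x) false) =
      ((PySem.List.pyRange 0 15 1).foldl
        (fun p r => pvRunStepB (decide (0 < PySem.List.pyGetD C r 0)) p) (1, 0)).1 := by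
    rw [pv_distinct_eq bot_ranks hR]
    have hfil := pv_filter_eq_selM 15 0 (fun v => decide (v ∈ bot_ranks))
    rw [show (0 : Int) + ((15 : Nat) : Int) = 15 from by norm_num] at hfil
    rw [hfil, pv_longest_eq_startA]
    have hq : (PySem.List.pyRange 0 15 1).map (fun v => decide (v ∈ bot_ranks)) =
        (PySem.List.pyRange 0 15 1).map (fun r => decide (0 < PySem.List.pyGetD C r 0)) := by
      apply List.map_congr_left
      intro v hv
      rw [hread v hv]
      simp [List.count_pos_iff]
    rw [hq]
    have hrun := pv_run_eq_goA
      ((PySem.List.pyRange 0 15 1).map (fun r => decide (0 < PySem.List.pyGetD C r 0)))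
      0 1 0 (le_refl 1) (le_refl 0)
    rw [if_neg (lt_irrefl 0)] at hrun
    rw [List.foldl_map] at hrun
    exact hrun.symm
  rw [hconn]
  -- ==== score sums coincide ====
  have hscore : (0 : Int) + ((PySem.List.pyRange 0 15 1).map
        (fun v => (bot_ranks.count v : Int) * (if 8 < v then (v - 8) * 2 else 0))).sum
      + ((PySem.List.pyRange 2 15 1).map (fun r => pvBonus (PySem.List.pyGetD C r 0) r)).sum
      = 0 + ((PySem.List.pyRange 0 15 1).map
        (fun r => pvHc (PySem.List.pyGetD C r 0) r + pvBonusG (PySem.List.pyGetD C r 0) r)).sum := by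
    rw [PySem.List.sum_map_add_int]
    have e1 : ((PySem.List.pyRange 0 15 1).map
        (fun v => (bot_ranks.count v : Int) * (if 8 < v then (v - 8) * 2 else 0))).sum =
        ((PySem.List.pyRange 0 15 1).map (fun r => pvHc (PySem.List.pyGetD C r 0) r)).sum := by
      apply congrArg
      apply List.map_congr_left
      intro v hv
      rw [hread v hv]
      unfold pvHc
      split_ifs <;> ring
    have e2 : ((PySem.List.pyRange 2 15 1).map (fun r => pvBonus (PySem.List.pyGetD C r 0) r)).sum =
        ((PySem.List.pyRange 0 15 1).map (fun r => pvBonusG (PySem.List.pyGetD C r 0) r)).sum := by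
      rw [PySem.List.pyRange_one_append 0 2 15 (by norm_num) (by norm_num)]
      rw [List.map_append, List.sum_append]
      have e20 : ((PySem.List.pyRange 0 2 1).map
          (fun r => pvBonusG (PySem.List.pyGetD C r 0) r)).sum = 0 := by
        rw [show PySem.List.pyRange 0 2 1 = [0, 1] from by decide]
        simp [pvBonusG]
      have e21 : (PySem.List.pyRange 2 15 1).map (fun r => pvBonusG (PySem.List.pyGetD C r 0) r) =
          (PySem.List.pyRange 2 15 1).map (fun r => pvBonus (PySem.List.pyGetD C r 0) r) := by
        apply List.map_congr_left
        intro v hv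
        have hv' := PySem.List.mem_pyRange_one.mp hv
        unfold pvBonusG
        rw [if_pos hv'.1]
      rw [e20, e21]
      ring
    rw [e1, e2]
    ring
  rw [hscore]
  -- ==== wheel sums coincide ====
  have hwheel : ((PySem.List.pyRange 0 15 1).map
        (fun v => (bot_ranks.count v : Int) * (if v = 14 ∨ (2 ≤ v ∧ v ≤ 5) then 1 else 0))).sum =
      ((PySem.List.pyRange 0 15 1).map (fun r => pvWheelT (PySem.List.pyGetD C r 0) r)).sum := by
    apply congrArg
    apply List.map_congr_left
    intro v hv
    rw [hread v hv]
    unfold pvWheelT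
    split_ifs <;> ring
  rw [hwheel]
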